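-- pv_equiv track=rewrite | github.com/grapheneaffiliate/h4-polytopic-attention | agent_zero/arc_custom_solvers.py | solve_27a28665
-- ===== SOURCE A (Python) =====
-- def solve_27a28665(grid):
--     """3x3 binary pattern classification. Lookup shape -> output number."""
--     binary = tuple(tuple(1 if c != 0 else 0 for c in row) for row in grid)
--     patterns = {
--         ((1, 1, 0), (1, 0, 1), (0, 1, 0)): 1,
--         ((1, 0, 1), (0, 1, 0), (1, 0, 1)): 2,
--         ((0, 1, 1), (0, 1, 1), (1, 0, 0)): 3,
--         ((0, 1, 0), (1, 1, 1), (0, 1, 0)): 6,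
--     }
--     lookup = {}
--     for pat, out in patterns.items():
--         g = [list(row) for row in pat]
--         for _ in range(4):
--             key = tuple(tuple(r) for r in g)
--             lookup[key] = out
--             flipped = tuple(tuple(r[::-1]) for r in g)
--             lookup[flipped] = out
--             h, w = len(g), len(g[0])
--             g = [[g[h - 1 - r][c] for r in range(h)] for c in range(w)]
--     if binary in lookup:
--         return [[lookup[binary]]]
--     return [[0]]
-- ===== SOURCE B (Python) =====
-- def solve_27a28665(grid):
--     """3x3 binary pattern classification via symmetry normalization of the input."""
--     binary = tuple(tuple(1 if c != 0 else 0 for c in row) for row in grid)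
--     if len(binary) != 3 or any(len(r) != 3 for r in binary):
--         return [[0]]
--     syms = []
--     g = binary
--     for _ in range(4):
--         syms.append(g)
--         syms.append(tuple(r[::-1] for r in g))
--         g = tuple(zip(*g[::-1]))
--     for pat, out in (
--         (((1, 1, 0), (1, 0, 1), (0, 1, 0)), 1),
--         (((1, 0, 1), (0, 1, 0), (1, 0, 1)), 2),
--         (((0, 1, 1), (0, 1, 1), (1, 0, 0)), 3),
--         (((0, 1, 0), (1, 1, 1), (0, 1, 0)), 6),
--     ):
--         if pat in syms:
--             return [[out]]
--     return [[0]]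
-- ===== Notes on version B (the rewrite author's own statement) =====
-- stated objective: alternative
-- what changed: Instead of expanding the 4 base patterns into a 32-entry symmetry lookup table keyed by the input, B normalizes the other way: it generates the 8 dihedral symmetries of the (shape-checked 3x3) binarized input once and tests each base pattern for membership, returning [[0]] for non-3x3 inputs just like A's table miss.
import Mathlib
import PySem

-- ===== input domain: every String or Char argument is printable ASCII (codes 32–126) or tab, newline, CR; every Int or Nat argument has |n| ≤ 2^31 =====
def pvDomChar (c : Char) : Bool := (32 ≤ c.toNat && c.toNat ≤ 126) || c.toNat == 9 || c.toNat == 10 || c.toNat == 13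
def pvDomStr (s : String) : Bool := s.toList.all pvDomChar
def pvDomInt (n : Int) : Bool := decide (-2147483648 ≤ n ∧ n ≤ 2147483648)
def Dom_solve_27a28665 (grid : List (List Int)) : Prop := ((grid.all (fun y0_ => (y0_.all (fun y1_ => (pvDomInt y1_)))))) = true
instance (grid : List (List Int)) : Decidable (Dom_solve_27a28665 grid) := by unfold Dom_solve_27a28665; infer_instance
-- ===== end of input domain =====

-- B classifies by normalizing the input: it generates the input's 8 dihedral symmetries and
-- tests the 4 base patterns for membership, instead of expanding each pattern into a
-- 32-entry lookup table (objective: alternative decomposition, similar cost).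

-- ===== PORT A =====

-- shared conversion line `tuple(tuple(1 if c != 0 else 0 for c in row) for row in grid)`
def pyBin (grid : List (List Int)) : List (List Int) :=
  grid.map (fun row => row.map (fun c => if c ≠ 0 then (1 : Int) else 0))

-- `g = [[g[h - 1 - r][c] for r in range(h)] for c in range(w)]` (indices always in range here)
def rotA (g : List (List Int)) : List (List Int) :=
  let h := g.length
  let w := (g.headD []).length
  (List.range w).map (fun c => (List.range h).map (fun r => (g.getD (h - 1 - r) []).getD c 0))

def patternsA : PySem.Dict (List (List Int)) Int :=
  PySem.Dict.ofList
    [([[1,1,0],[1,0,1],[0,1,0]], 1),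
     ([[1,0,1],[0,1,0],[1,0,1]], 2),
     ([[0,1,1],[0,1,1],[1,0,0]], 3),
     ([[0,1,0],[1,1,1],[0,1,0]], 6)]

-- the two nested loops building `lookup`
def lookupA : PySem.Dict (List (List Int)) Int :=
  patternsA.items.foldl
    (fun lk po =>
      ((List.range 4).foldl
        (fun (s : PySem.Dict (List (List Int)) Int × List (List Int)) _ =>
          let lk2 := s.1.insert s.2 po.2
          let lk3 := lk2.insert (s.2.map List.reverse) po.2
          (lk3, rotA s.2))
        (lk, po.1)).1)
    PySem.Dict.empty

def solve_27a28665 (grid : List (List Int)) : List (List Int) :=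
  let binary := pyBin grid
  match lookupA.get? binary with
  | some v => [[v]]
  | none => [[0]]

-- ===== PORT B =====

-- fuel-bounded transposition, exact for Python zip(*g): stops at the shortest row
def zipN : Nat → List (List Int) → List (List Int)
  | 0, _ => []
  | n + 1, g =>
      if g.any (fun r => r.isEmpty) then []
      else (g.map (fun r => r.headD 0)) :: zipN n (g.map (fun r => r.tail))

def zipStar (g : List (List Int)) : List (List Int) :=
  if g.isEmpty then [] else zipN (g.headD []).length g

-- `tuple(zip(*g[::-1]))`
def rotB (g : List (List Int)) : List (List Int) := zipStar g.reverse

-- the symmetry-accumulating loop of B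
def symsB (binary : List (List Int)) : List (List (List Int)) :=
  ((List.range 4).foldl
    (fun (s : List (List (List Int)) × List (List Int)) _ =>
      (s.1 ++ [s.2, s.2.map List.reverse], rotB s.2))
    ([], binary)).1

def patListB : List (List (List Int) × Int) :=
  [([[1,1,0],[1,0,1],[0,1,0]], 1),
   ([[1,0,1],[0,1,0],[1,0,1]], 2),
   ([[0,1,1],[0,1,1],[1,0,0]], 3),
   ([[0,1,0],[1,1,1],[0,1,0]], 6)]

-- `for pat, out in (...): if pat in syms: return [[out]]` then `return [[0]]`
def findPatB : List (List (List Int) × Int) → List (List (List Int)) → List (List Int)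
  | [], _ => [[0]]
  | po :: rest, s => if s.contains po.1 then [[po.2]] else findPatB rest s

def solve_27a28665_alt (grid : List (List Int)) : List (List Int) :=
  let binary := pyBin grid
  if binary.length != 3 || binary.any (fun r => r.length != 3) then [[0]]
  else findPatB patListB (symsB binary)

-- ===== PRECONDITION & SPEC =====
def Spec_solve_27a28665 (grid : List (List Int)) (out : List (List Int)) : Prop := out = solve_27a28665_alt grid
instance (grid : List (List Int)) (out : List (List Int)) : Decidable (Spec_solve_27a28665 grid out) := by unfold Spec_solve_27a28665; infer_instance

-- ===== CLAIM (what is proved, stated in full; the proofs are below) =====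
def Claim_equal_solve_27a28665 : Prop := ∀ (grid : List (List Int)), Dom_solve_27a28665 grid → Spec_solve_27a28665 grid (solve_27a28665 grid)

-- ===== LEMMAS AND PROOFS =====

-- every key of A's lookup table is a 3×3 grid
theorem lookupA_keys_shape :
    lookupA.keys.all (fun k => k.length == 3 && k.all (fun r => r.length == 3)) = true := by
  decide

theorem lookupA_get?_none (b : List (List Int))
    (hb : (b.length == 3 && b.all (fun r => r.length == 3)) = false) :
    lookupA.get? b = none := by
  rw [PySem.Dict.get?_eq_none_iff_not_mem_keys]
  intro hmem
  have h := List.all_eq_true.mp lookupA_keys_shape b hmem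
  rw [hb] at h
  exact Bool.false_ne_true h

-- Bool → {0,1}
def b2i (b : Bool) : Int := if b then 1 else 0

theorem b2i_eq (x : Int) : (if x ≠ 0 then (1 : Int) else 0) = b2i (decide (x ≠ 0)) := by
  by_cases h : x = 0 <;> simp [b2i, h]

set_option maxHeartbeats 4000000 in
theorem key512 : ∀ b1 b2 b3 b4 b5 b6 b7 b8 b9 : Bool,
    (match lookupA.get? [[b2i b1, b2i b2, b2i b3], [b2i b4, b2i b5, b2i b6], [b2i b7, b2i b8, b2i b9]] with
      | some v => [[v]]
      | none => [[0]]) =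
    findPatB patListB (symsB [[b2i b1, b2i b2, b2i b3], [b2i b4, b2i b5, b2i b6], [b2i b7, b2i b8, b2i b9]]) := by
  decide

-- ===== VERDICT (by name: the statement is the Claim_ definition above) =====
theorem solve_27a28665_spec : Claim_equal_solve_27a28665 := by
  intro grid _
  unfold Spec_solve_27a28665 solve_27a28665 solve_27a28665_alt
  by_cases hs : ((pyBin grid).length == 3 && (pyBin grid).all (fun r => r.length == 3)) = true
  · -- 3×3 case: grid has exactly 3 rows of 3 entries
    have h3 : grid.length = 3 ∧ ∀ r ∈ grid, r.length = 3 := by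
      simp only [pyBin, List.length_map, List.all_map, Bool.and_eq_true, beq_iff_eq,
        List.all_eq_true] at hs
      exact ⟨hs.1, fun r hr => by simpa using hs.2 r hr⟩
    match grid, h3 with
    | [r1, r2, r3], ⟨_, hrows⟩ =>
      have h1 := hrows r1 (by simp)
      have h2 := hrows r2 (by simp)
      have h3' := hrows r3 (by simp)
      match r1, r2, r3, h1, h2, h3' with
      | [a1,a2,a3], [a4,a5,a6], [a7,a8,a9], _, _, _ =>
        simp only [pyBin, List.map_cons, List.map_nil, b2i_eq]
        have hkey := key512 (decide (a1 ≠ 0)) (decide (a2 ≠ 0)) (decide (a3 ≠ 0))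
          (decide (a4 ≠ 0)) (decide (a5 ≠ 0)) (decide (a6 ≠ 0))
          (decide (a7 ≠ 0)) (decide (a8 ≠ 0)) (decide (a9 ≠ 0))
        simpa using hkey
  · -- non-3×3 case: both return [[0]]
    have hb : ((pyBin grid).length == 3 && (pyBin grid).all (fun r => r.length == 3)) = false :=
      Bool.eq_false_iff.mpr hs
    show (match lookupA.get? (pyBin grid) with | some v => [[v]] | none => [[0]]) =
      (if ((pyBin grid).length != 3 || (pyBin grid).any fun r => r.length != 3) = true
        then [[0]] else findPatB patListB (symsB (pyBin grid)))
    rw [lookupA_get?_none _ hb]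
    have : ((pyBin grid).length != 3 || (pyBin grid).any (fun r => r.length != 3)) = true := by
      rcases Bool.and_eq_false_iff.mp hb with h | h
      · simp only [Bool.or_eq_true, bne_iff_ne]
        exact Or.inl (by simpa using h)
      · simp only [Bool.or_eq_true, List.any_eq_true]
        right
        rcases List.all_eq_false.mp h with ⟨r, hr, hrl⟩
        exact ⟨r, hr, by simpa using hrl⟩
    simp [this]
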